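-- pv_equiv track=rewrite | github.com/AntonCoon/HA | cases/case_generation.py | special_hap_gen
-- ===== SOURCE A (Python) =====
-- from typing import List
--
-- def special_hap_gen(ref: List[str], pos: List[int], nucls: List[list]) -> List:
--     haps = []
--     for substitutions in nucls:
--         haplotype = ref[:]
--         for idx, nucl in zip(pos, substitutions):
--             haplotype[idx] = nucl
--         haps.append(''.join(haplotype))
--
--     return haps
-- ===== SOURCE B (Python) =====
-- def special_hap_gen(ref, pos, nucls):
--     # Sort-and-splice: per variant row, collect the substitutions keyed by
--     # normalized position (validating it, since slices would silently ignore
--     # a bad position), sort the positions, and assemble the haplotype by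
--     # concatenating the untouched reference runs between them.
--     n = len(ref)
--     haps = []
--     for substitutions in nucls:
--         sub_at = {}
--         for p, s in zip(pos, substitutions):
--             i = p + n if p < 0 else p
--             if not 0 <= i < n:
--                 raise IndexError('substitution position out of range')
--             sub_at[i] = s
--         parts = []
--         prev = 0
--         for i in sorted(sub_at):
--             parts.append(''.join(ref[prev:i]))
--             parts.append(sub_at[i])
--             prev = i + 1
--         parts.append(''.join(ref[prev:]))
--         haps.append(''.join(parts))
--     return haps
-- ===== Notes on version B (the rewrite author's own statement) =====
-- stated objective: alternative
-- what changed: Instead of copying the reference and overwriting it at each substitution position, B collects each row's substitutions keyed by validated normalized position, sorts the positions, and builds the haplotype by splicing the untouched reference runs between consecutive substitution points; Pre_ excludes inputs where some used position is out of range, on which both raise IndexError.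
import Mathlib
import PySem

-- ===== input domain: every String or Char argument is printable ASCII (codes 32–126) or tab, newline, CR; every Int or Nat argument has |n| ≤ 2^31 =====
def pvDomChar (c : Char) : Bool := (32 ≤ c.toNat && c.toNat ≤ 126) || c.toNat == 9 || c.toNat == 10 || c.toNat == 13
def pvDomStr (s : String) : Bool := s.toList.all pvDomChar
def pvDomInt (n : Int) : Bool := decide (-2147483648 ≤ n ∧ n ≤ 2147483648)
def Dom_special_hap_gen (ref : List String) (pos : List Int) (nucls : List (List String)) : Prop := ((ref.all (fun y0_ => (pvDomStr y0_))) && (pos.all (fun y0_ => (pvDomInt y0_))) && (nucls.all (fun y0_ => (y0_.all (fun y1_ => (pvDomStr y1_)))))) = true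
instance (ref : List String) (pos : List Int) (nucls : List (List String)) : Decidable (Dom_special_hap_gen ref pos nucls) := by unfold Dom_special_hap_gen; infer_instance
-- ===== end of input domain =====

-- B replaces A's copy-and-overwrite with sort-and-splice: it keys each row's
-- substitutions by validated normalized position, sorts the positions, and assembles
-- the haplotype by concatenating the untouched reference runs between them (alternative).

-- ===== PORT A =====
def special_hap_gen (ref : List String) (pos : List Int) (nucls : List (List String)) : List String :=
  nucls.foldl (fun haps substitutions =>
    let haplotype := (pos.zip substitutions).foldl
      (fun h pr => PySem.List.pySetD h pr.1 pr.2) ref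
    haps ++ [PySem.Str.join "" haplotype]) []

-- ===== PORT B =====
def special_hap_gen_alt (ref : List String) (pos : List Int) (nucls : List (List String)) : List String :=
  let n : Int := (ref.length : Int)
  nucls.foldl (fun haps substitutions =>
    let subAt : PySem.Dict Int String :=
      (pos.zip substitutions).foldl
        (fun d pr =>
          let i := if pr.1 < 0 then pr.1 + n else pr.1
          if 0 ≤ i ∧ i < n then d.insert i pr.2
          else d  -- Python raises IndexError here; unreachable under Pre_
          ) PySem.Dict.empty
    let st := (PySem.List.sorted subAt.keys (fun k => k) false).foldl
      (fun (st : List String × Int) i =>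
        -- sub_at[i]: i is always a key of subAt here, so getD never takes its default
        (st.1 ++ [PySem.Str.join "" (PySem.List.slice ref (some st.2) (some i)), subAt.getD i ""], i + 1))
      (([] : List String), (0 : Int))
    haps ++ [PySem.Str.join "" (st.1 ++ [PySem.Str.join "" (PySem.List.slice ref (some st.2) none)])]) []

-- ===== PRECONDITION & SPEC =====
-- Pre_ excludes exactly the inputs where A raises IndexError: some substitution
-- position actually used (zip-truncated) is out of range of the reference.
def Pre_special_hap_gen (ref : List String) (pos : List Int) (nucls : List (List String)) : Prop :=
  ∀ subs ∈ nucls, ∀ pr ∈ pos.zip subs, PySem.Raise.InRange ref.length pr.1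
instance (ref : List String) (pos : List Int) (nucls : List (List String)) : Decidable (Pre_special_hap_gen ref pos nucls) := by unfold Pre_special_hap_gen; infer_instance
def pvWitness_special_hap_gen : List String × List Int × List (List String) :=
  (["A", "C", "G"], [0, -1], [["t", "g"], ["c"]])

def Spec_special_hap_gen (ref : List String) (pos : List Int) (nucls : List (List String)) (out : List String) : Prop := out = special_hap_gen_alt ref pos nucls
instance (ref : List String) (pos : List Int) (nucls : List (List String)) (out : List String) : Decidable (Spec_special_hap_gen ref pos nucls out) := by unfold Spec_special_hap_gen; infer_instance

-- ===== CLAIM (what is proved, stated in full; the proofs are below) =====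
def Claim_equal_special_hap_gen : Prop := ∀ (ref : List String) (pos : List Int) (nucls : List (List String)), Dom_special_hap_gen ref pos nucls → Pre_special_hap_gen ref pos nucls → Spec_special_hap_gen ref pos nucls (special_hap_gen ref pos nucls)

-- ===== LEMMAS AND PROOFS =====

-- the characters of a list of strings, in order
def charsOf (L : List String) : List Char := (L.map String.toList).flatten

-- B's splice loop, written as a structural recursion over the sorted key list
def spliceRec (d : PySem.Dict Int String) (ref : List String) : List Int → Int → List String
  | [], prev => [PySem.Str.join "" (PySem.List.slice ref (some prev) none)]
  | k :: ks, prev =>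
      PySem.Str.join "" (PySem.List.slice ref (some prev) (some k)) :: d.getD k "" ::
        spliceRec d ref ks (k + 1)

lemma charsOf_nil : charsOf [] = [] := rfl

lemma charsOf_cons (s : String) (L : List String) : charsOf (s :: L) = s.toList ++ charsOf L := by
  simp [charsOf]

lemma charsOf_append (L1 L2 : List String) : charsOf (L1 ++ L2) = charsOf L1 ++ charsOf L2 := by
  simp [charsOf]

lemma intercalate_nil_flatten (l : List (List Char)) : ([] : List Char).intercalate l = l.flatten := by
  induction l with
  | nil => rfl
  | cons x xs ih =>
    cases xs with
    | nil => simp [List.intercalate]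
    | cons y ys =>
      simp only [List.intercalate, List.intersperse] at *
      simp_all

lemma join_eq_ofList (L : List String) : PySem.Str.join "" L = String.ofList (charsOf L) := by
  simp [PySem.Str.join, PySem.Chars.join, intercalate_nil_flatten, charsOf]

lemma toList_join (L : List String) : (PySem.Str.join "" L).toList = charsOf L := by
  rw [join_eq_ofList, String.toList_ofList]

lemma getD_irrel (d : PySem.Dict Int String) (k : Int) (a b : String) (h : k ∈ d.keys) :
    d.getD k a = d.getD k b := by
  have h1 : (d.get? k).isSome := by
    rw [← PySem.Dict.contains_eq_isSome_get?]
    exact (PySem.Dict.contains_iff_mem_keys d k).mpr h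
  cases h2 : d.get? k with
  | none => rw [h2] at h1; simp at h1
  | some v => simp [PySem.Dict.getD, h2]

lemma getD_not_mem (d : PySem.Dict Int String) (k : Int) (a : String) (h : k ∉ d.keys) :
    d.getD k a = a := by
  have h2 : d.get? k = none := (PySem.Dict.get?_eq_none_iff_not_mem_keys d k).mpr h
  simp [PySem.Dict.getD, h2]

-- an in-range (possibly negative) Python index assignment is List.set at the normalized index
lemma pySetD_eq_set (h : List String) (i : Int) (v : String) (hin : PySem.Raise.InRange h.length i) :
    PySem.List.pySetD h i v = h.set (if i < 0 then (i + h.length).toNat else i.toNat) v := by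
  obtain ⟨h1, h2⟩ := hin
  simp only [PySem.List.pySetD, PySem.List.pySet?, PySem.List.pyIdx?]
  by_cases p : 0 ≤ i
  · simp only [p, if_true, h2, if_true, Option.map_some, Option.getD_some]
    rw [if_neg (by omega)]
  · simp only [p, if_false, show -(h.length:Int) ≤ i from h1, if_true, Option.map_some, Option.getD_some]
    rw [if_pos (by omega)]
    congr 1
    omega

lemma length_fold_pySetD (pairs : List (Int × String)) (hap : List String) :
    (pairs.foldl (fun h pr => PySem.List.pySetD h pr.1 pr.2) hap).length = hap.length := by
  induction pairs generalizing hap with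
  | nil => rfl
  | cons q qs ih => simp [List.foldl_cons, ih, PySem.List.length_pySetD]

-- pointwise: A's overwrite loop at index k equals the dict lookup with default hap[k]
lemma fold_set_getElem?_eq (m : Nat) (pairs : List (Int × String)) (hap : List String)
    (hlen : hap.length = m)
    (hin : ∀ pr ∈ pairs, PySem.Raise.InRange m pr.1) (k : Nat) (hk : k < m) :
    (pairs.foldl (fun h pr => PySem.List.pySetD h pr.1 pr.2) hap)[k]? =
      some ((pairs.foldl (fun d pr => d.insert (if pr.1 < 0 then pr.1 + (m:Int) else pr.1) pr.2)
              (PySem.Dict.empty : PySem.Dict Int String)).getD (k:Int) (hap.getD k "")) := by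
  induction pairs using List.reverseRecOn with
  | nil =>
    simp only [List.foldl_nil, PySem.Dict.getD_empty]
    rw [List.getElem?_eq_getElem (by omega), List.getD_eq_getElem hap "" (by omega)]
  | append_singleton qs q ih =>
    have hq : PySem.Raise.InRange m q.1 := hin q (by simp)
    have hqs : ∀ pr ∈ qs, PySem.Raise.InRange m pr.1 := fun pr hm => hin pr (by simp [hm])
    rw [List.foldl_append, List.foldl_append]
    simp only [List.foldl_cons, List.foldl_nil]
    have hplen : (qs.foldl (fun h pr => PySem.List.pySetD h pr.1 pr.2) hap).length = m := by
      rw [length_fold_pySetD, hlen]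
    rw [pySetD_eq_set _ _ _ (by rw [hplen]; exact hq), hplen, PySem.Dict.getD_insert,
      List.getElem?_set, hplen]
    have hnorm : ((if q.1 < 0 then (q.1 + (m:Int)).toNat else q.1.toNat) = k)
        ↔ ((k:Int) = if q.1 < 0 then q.1 + (m:Int) else q.1) := by
      obtain ⟨a1, a2⟩ := hq
      by_cases p : q.1 < 0 <;> simp [p] <;> omega
    by_cases hc : (k:Int) = if q.1 < 0 then q.1 + (m:Int) else q.1
    · rw [if_pos hc, if_pos (hnorm.mpr hc), if_pos (by obtain ⟨a1,a2⟩ := hq; by_cases p : q.1 < 0 <;> simp [p] <;> omega)]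
    · rw [if_neg hc, if_neg (fun h => hc (hnorm.mp h))]
      exact ih hqs

-- one substitution row of A equals the per-index dict lookup over all indices
lemma row_eq (ref : List String) (pos : List Int) (subs : List String)
    (hin : ∀ pr ∈ pos.zip subs, PySem.Raise.InRange ref.length pr.1) :
    (pos.zip subs).foldl (fun h pr => PySem.List.pySetD h pr.1 pr.2) ref =
      (List.range' 0 ref.length).map
        (fun (k : Nat) => ((pos.zip subs).foldl
          (fun d pr => d.insert (if pr.1 < 0 then pr.1 + (ref.length:Int) else pr.1) pr.2)
          (PySem.Dict.empty : PySem.Dict Int String)).getD (k:Int) (ref.getD k "")) := by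
  apply List.ext_getElem?
  intro k
  by_cases hk : k < ref.length
  · have hk' : k < (List.range' 0 ref.length).length := by simpa using hk
    rw [fold_set_getElem?_eq ref.length _ ref rfl hin k hk, List.getElem?_map,
      List.getElem?_eq_getElem hk']
    simp [List.getElem_range', List.getD]
  · rw [List.getElem?_eq_none, List.getElem?_eq_none]
    · simp only [List.length_map, List.length_range']; omega
    · rw [length_fold_pySetD]; omega

-- B's foldl splice loop, unrolled to spliceRec
lemma foldl_splice (d : PySem.Dict Int String) (ref : List String) (ks : List Int) :
    ∀ (parts0 : List String) (prev : Int),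
    (ks.foldl (fun (st : List String × Int) i =>
        (st.1 ++ [PySem.Str.join "" (PySem.List.slice ref (some st.2) (some i)), d.getD i ""], i + 1))
      (parts0, prev)).1 ++
      [PySem.Str.join "" (PySem.List.slice ref
        (some (ks.foldl (fun (st : List String × Int) i =>
          (st.1 ++ [PySem.Str.join "" (PySem.List.slice ref (some st.2) (some i)), d.getD i ""], i + 1))
          (parts0, prev)).2) none)]
    = parts0 ++ spliceRec d ref ks prev := by
  induction ks with
  | nil => intro parts0 prev; simp [spliceRec]
  | cons k ks ih =>
    intro parts0 prev
    simp only [List.foldl_cons, spliceRec]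
    rw [ih]
    simp

-- per-index lookups over an untouched index range are the reference itself
lemma map_getD_range' (ref : List String) :
    ∀ (cnt prev : Nat), prev + cnt ≤ ref.length →
    (List.range' prev cnt).map (fun j => (ref.getD j "").toList) =
      ((ref.drop prev).take cnt).map String.toList := by
  intro cnt
  induction cnt with
  | zero => intro prev _; simp
  | succ c ih =>
    intro prev h
    rw [List.range'_succ, List.drop_eq_getElem_cons (l := ref) (by omega),
      List.take_succ_cons, List.map_cons, List.map_cons, ih (prev+1) (by omega),
      List.getD_eq_getElem ref "" (by omega)]

-- the splice over a sorted key list produces exactly the per-index choice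
lemma splice_chars (d : PySem.Dict Int String) (ref : List String) :
    ∀ (ks : List Int) (prev : Nat), prev ≤ ref.length →
    List.Pairwise (· < ·) ks →
    (∀ k ∈ ks, (prev:Int) ≤ k ∧ k < (ref.length:Int)) →
    (∀ j : Nat, prev ≤ j → j < ref.length → ((j:Int) ∈ ks ↔ (j:Int) ∈ d.keys)) →
    charsOf (spliceRec d ref ks (prev:Int)) =
      charsOf ((List.range' prev (ref.length - prev)).map
        (fun (k : Nat) => d.getD (k:Int) (ref.getD k ""))) := by
  intro ks
  induction ks with
  | nil =>
    intro prev hprev _ _ hmem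
    rw [spliceRec, charsOf_cons, charsOf_nil, List.append_nil, toList_join,
      PySem.List.slice_from_natCast]
    have hcg : (List.range' prev (ref.length - prev)).map
        (fun (k : Nat) => d.getD (k:Int) (ref.getD k "")) =
        (List.range' prev (ref.length - prev)).map (fun (k : Nat) => ref.getD k "") := by
      apply List.map_congr_left
      intro j hj
      have hj' := List.mem_range'_1.mp hj
      exact getD_not_mem d (j:Int) _
        (fun hk => List.not_mem_nil ((hmem j hj'.1 (by omega)).mpr hk))
    rw [hcg]
    have h2 : ((List.range' prev (ref.length - prev)).map (fun (k : Nat) => ref.getD k "")).map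
        String.toList = ((ref.drop prev).take (ref.length - prev)).map String.toList := by
      rw [List.map_map]
      exact map_getD_range' ref (ref.length - prev) prev (by omega)
    unfold charsOf
    rw [h2, List.take_of_length_le (by simp)]
  | cons k ks ih =>
    intro prev hprev hpw hbnd hmem
    obtain ⟨hklt, hpw'⟩ := List.pairwise_cons.mp hpw
    obtain ⟨hb1, hb2⟩ := hbnd k (List.mem_cons_self)
    have hkc : ((k.toNat : Nat) : Int) = k := by omega
    have hkN1 : prev ≤ k.toNat := by omega
    have hkN2 : k.toNat < ref.length := by omega
    -- left side
    have hsl : PySem.List.slice ref (some (prev:Int)) (some k) =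
        (ref.drop prev).take (k.toNat - prev) := by
      rw [← hkc, PySem.List.slice_natCast]
      simp
      omega
    rw [spliceRec, charsOf_cons, charsOf_cons, hsl, toList_join]
    -- unroll the index range at k
    have hsplit : List.range' prev (ref.length - prev) =
        List.range' prev (k.toNat - prev) ++ (k.toNat :: List.range' (k.toNat + 1) (ref.length - k.toNat - 1)) := by
      have e1 : ref.length - prev = (k.toNat - prev) + (ref.length - k.toNat) := by omega
      rw [e1, ← List.range'_append_1]
      congr 1
      obtain ⟨m, hm⟩ : ∃ m, ref.length - k.toNat = m + 1 := ⟨ref.length - k.toNat - 1, by omega⟩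
      rw [show prev + (k.toNat - prev) = k.toNat by omega, hm, List.range'_succ]
      simp
    rw [hsplit, List.map_append, charsOf_append, List.map_cons, charsOf_cons]
    -- first segment: an untouched reference run
    have hseg1 : (List.range' prev (k.toNat - prev)).map
        (fun (j : Nat) => d.getD (j:Int) (ref.getD j "")) =
        (List.range' prev (k.toNat - prev)).map (fun (j : Nat) => ref.getD j "") := by
      apply List.map_congr_left
      intro j hj
      have hj' := List.mem_range'_1.mp hj
      apply getD_not_mem d (j:Int) _
      intro hk
      rcases List.mem_cons.mp ((hmem j hj'.1 (by omega)).mpr hk) with h | h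
      · omega
      · exact absurd (hklt _ h) (by omega)
    have hseg1' : charsOf ((List.range' prev (k.toNat - prev)).map
        (fun (j : Nat) => d.getD (j:Int) (ref.getD j ""))) =
        charsOf ((ref.drop prev).take (k.toNat - prev)) := by
      unfold charsOf
      rw [hseg1, List.map_map]
      congr 1
      exact map_getD_range' ref (k.toNat - prev) prev (by omega)
    -- the substituted position itself
    have hmemk : k ∈ d.keys := by
      have := (hmem k.toNat hkN1 hkN2).mp (by rw [hkc]; exact List.mem_cons_self)
      rwa [hkc] at this
    have hmid : d.getD ((k.toNat : Nat) : Int) (ref.getD k.toNat "") = d.getD k "" := by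
      rw [hkc]
      exact getD_irrel d k _ "" hmemk
    -- the tail via the induction hypothesis
    have htail : charsOf (spliceRec d ref ks (k + 1)) =
        charsOf ((List.range' (k.toNat + 1) (ref.length - k.toNat - 1)).map
          (fun (j : Nat) => d.getD (j:Int) (ref.getD j ""))) := by
      have hc1 : (k + 1 : Int) = ((k.toNat + 1 : Nat) : Int) := by omega
      rw [hc1]
      have := ih (k.toNat + 1) (by omega) hpw'
        (fun b hb => ⟨by have := hklt b hb; omega, (hbnd b (List.mem_cons_of_mem _ hb)).2⟩)
        (fun j hj1 hj2 => by
          rw [← hmem j (by omega) hj2]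
          constructor
          · exact fun h => List.mem_cons_of_mem _ h
          · intro h
            rcases List.mem_cons.mp h with h' | h'
            · exfalso; omega
            · exact h')
      rw [this]
      have e : ref.length - (k.toNat + 1) = ref.length - k.toNat - 1 := by omega
      rw [e]
    rw [htail, hseg1', hmid]

-- one row: B's sort-and-splice equals the per-index dict lookup over all indices
lemma row_join (ref : List String) (d : PySem.Dict Int String)
    (hkeys : ∀ k ∈ d.keys, 0 ≤ k ∧ k < (ref.length:Int)) (hnd : d.keys.Nodup) :
    PySem.Str.join ""
      ((((PySem.List.sorted d.keys (fun k => k) false).foldl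
          (fun (st : List String × Int) i =>
            (st.1 ++ [PySem.Str.join "" (PySem.List.slice ref (some st.2) (some i)), d.getD i ""], i + 1))
          (([] : List String), (0:Int))).1) ++
        [PySem.Str.join "" (PySem.List.slice ref
          (some ((PySem.List.sorted d.keys (fun k => k) false).foldl
            (fun (st : List String × Int) i =>
              (st.1 ++ [PySem.Str.join "" (PySem.List.slice ref (some st.2) (some i)), d.getD i ""], i + 1))
            (([] : List String), (0:Int))).2) none)]) =
    PySem.Str.join "" ((List.range' 0 ref.length).map
      (fun (k : Nat) => d.getD (k:Int) (ref.getD k ""))) := by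
  rw [foldl_splice d ref (PySem.List.sorted d.keys (fun k => k) false) [] 0, List.nil_append,
    join_eq_ofList, join_eq_ofList]
  congr 1
  have hpw : List.Pairwise (· < ·) (PySem.List.sorted d.keys (fun k => k) false) := by
    have hle := PySem.List.sorted_pairwise d.keys (fun k => k)
    have hne : (PySem.List.sorted d.keys (fun k => k) false).Nodup :=
      ((PySem.List.sorted_perm d.keys (fun k => k) false).nodup_iff).mpr hnd
    exact (List.Pairwise.and hle hne).imp (fun h => lt_of_le_of_ne h.1 h.2)
  have h0 : ((0:Nat):Int) = (0:Int) := rfl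
  have := splice_chars d ref (PySem.List.sorted d.keys (fun k => k) false) 0
    (Nat.zero_le _) hpw
    (fun k hk => by
      have := hkeys k ((PySem.List.mem_sorted d.keys (fun k => k) false k).mp hk)
      simpa using this)
    (fun j _ _ => PySem.List.mem_sorted d.keys (fun k => k) false (j:Int))
  rw [h0] at this
  rw [this, Nat.sub_zero]

-- ===== VERDICT (by name: the statement is the Claim_ definition above) =====
theorem special_hap_gen_spec : Claim_equal_special_hap_gen := by
  intro ref pos nucls _hdom hpre
  unfold Spec_special_hap_gen
  simp only [special_hap_gen, special_hap_gen_alt,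
    PySem.List.foldl_append_singleton_eq_map, List.nil_append]
  apply List.map_congr_left
  intro subs hmem
  have hin := hpre subs hmem
  have hfold : (pos.zip subs).foldl
      (fun d pr =>
        let i := if pr.1 < 0 then pr.1 + (ref.length:Int) else pr.1
        if 0 ≤ i ∧ i < (ref.length:Int) then d.insert i pr.2 else d)
      (PySem.Dict.empty : PySem.Dict Int String) =
    (pos.zip subs).foldl
      (fun d pr => d.insert (if pr.1 < 0 then pr.1 + (ref.length:Int) else pr.1) pr.2)
      (PySem.Dict.empty : PySem.Dict Int String) := by
    apply PySem.List.foldl_congr_mem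
    intro acc pr hpr
    obtain ⟨h1, h2⟩ := hin pr hpr
    simp only []
    rw [if_pos (by split <;> constructor <;> omega)]
  rw [hfold]
  have hkeys : ∀ k ∈ ((pos.zip subs).foldl
      (fun d pr => d.insert (if pr.1 < 0 then pr.1 + (ref.length:Int) else pr.1) pr.2)
      (PySem.Dict.empty : PySem.Dict Int String)).keys, 0 ≤ k ∧ k < (ref.length:Int) := by
    intro k hk
    rw [PySem.Dict.keys_foldl_insert_key] at hk
    rcases (PySem.Set.mem_update _ _ _).mp hk with h | h
    · rw [PySem.Dict.keys_empty] at h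
      exact absurd h (List.not_mem_nil)
    · obtain ⟨pr, hpr, hkey⟩ := List.mem_map.mp h
      obtain ⟨h1, h2⟩ := hin pr hpr
      subst hkey
      constructor <;> [skip; skip] <;> split <;> omega
  have hnd : ((pos.zip subs).foldl
      (fun d pr => d.insert (if pr.1 < 0 then pr.1 + (ref.length:Int) else pr.1) pr.2)
      (PySem.Dict.empty : PySem.Dict Int String)).keys.Nodup :=
    PySem.Dict.nodup_keys_foldl_insert_key _ _ _ _ PySem.Dict.nodup_keys_empty
  rw [row_eq ref pos subs hin, row_join ref _ hkeys hnd]
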